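-- pv_equiv track=rewrite | github.com/ben-from-earth/MegsComfortCreations | Meg's Media Cover Manager (Python Working).py | parse_title_author
-- ===== SOURCE A (Python) =====
-- def parse_title_author(text):
--     """
--     Parses a string to extract a title and author.
--     Supported delimiters: "--", "-", "/", "\\", "|"
--     Returns a tuple (title, author) where author may be empty.
--     """
--     delimiters = ["--", "-", "/", "\\", "|"]
--     pos = len(text)
--     selected_delim = None
--     for delim in delimiters:
--         i = text.find(delim)
--         if i != -1 and i < pos:
--             pos = i
--             selected_delim = delim
--     if selected_delim:
--         parts = text.split(selected_delim, 1)
--         title = parts[0].strip()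
--         author = parts[1].strip()
--         return title, author
--     return text.strip(), ""
-- ===== SOURCE B (Python) =====
-- def parse_title_author(text):
--     delimiters = ["--", "-", "/", "\\", "|"]
--     for i in range(len(text)):
--         for delim in delimiters:
--             if text.startswith(delim, i):
--                 return text[:i].strip(), text[i + len(delim):].strip()
--     return text.strip(), ""
-- ===== Notes on version B (the rewrite author's own statement) =====
-- stated objective: simpler
-- what changed: Replaces five full find() scans plus min-position bookkeeping and a split() call with a single left-to-right positional scan that returns at the first position where any delimiter (tested in list order, so '--' still beats '-') matches.
import Mathlib
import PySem

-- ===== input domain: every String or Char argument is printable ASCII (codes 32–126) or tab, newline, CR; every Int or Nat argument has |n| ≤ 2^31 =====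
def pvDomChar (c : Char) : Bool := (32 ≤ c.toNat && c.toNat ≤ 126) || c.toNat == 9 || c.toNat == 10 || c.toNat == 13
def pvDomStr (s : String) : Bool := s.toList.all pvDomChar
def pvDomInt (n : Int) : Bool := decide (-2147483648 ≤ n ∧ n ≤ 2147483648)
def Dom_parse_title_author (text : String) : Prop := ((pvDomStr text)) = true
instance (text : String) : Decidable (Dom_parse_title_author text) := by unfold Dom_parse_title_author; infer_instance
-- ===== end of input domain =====

-- B replaces A's five full find() scans plus min-position bookkeeping and split() with one
-- left-to-right positional scan that stops at the first position where a delimiter matches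
-- (delimiters tested in list order, so '--' still beats '-'); return values only, no mutation.

-- ===== PORT A =====
-- loop body of A's 'for delim in delimiters' loop
def pvStepA (text : String) (acc : Int × Option String) (delim : String) : Int × Option String :=
  let i := PySem.Str.find text delim
  if i ≠ -1 ∧ i < acc.1 then (i, some delim) else acc

def parse_title_author (text : String) : String × String :=
  let delimiters : List String := ["--", "-", "/", "\\", "|"]
  let st := delimiters.foldl (pvStepA text) (PySem.Str.len text, none)
  -- 'if selected_delim:' — every delimiter is a nonempty string, so truthy iff not None
  match st.2 with
  | some sel =>
      -- sel occurs in text, so text.split(sel, 1) has exactly two parts: the getD defaults are unreachable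
      let parts := (PySem.Str.splitMax? text sel 1).getD []
      let title := PySem.Str.strip ((PySem.List.pyGet? parts 0).getD "")
      let author := PySem.Str.strip ((PySem.List.pyGet? parts 1).getD "")
      (title, author)
  | none => (PySem.Str.strip text, "")

-- ===== PORT B =====
def pvDelimsB : List String := ["--", "-", "/", "\\", "|"]

-- the 'for i in range(len(text))' loop with its early return; text.startswith(delim, i) with
-- 0 ≤ i ≤ len(text) is exactly 'delim is a prefix of the characters from position i'
def pvScanB (s : List Char) (i : Nat) : Option (Nat × String) :=
  if _h : i < s.length then
    match pvDelimsB.find? (fun d => PySem.Chars.startswith (s.drop i) d.toList) with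
    | some d => some (i, d)
    | none => pvScanB s (i + 1)
  else none
termination_by s.length - i

def parse_title_author_alt (text : String) : String × String :=
  match pvScanB text.toList 0 with
  | some (i, d) =>
      (PySem.Str.strip (PySem.Str.slice text none (some (i : Int))),
       PySem.Str.strip (PySem.Str.slice text (some ((i : Int) + PySem.Str.len d)) none))
  | none => (PySem.Str.strip text, "")

-- ===== PRECONDITION & SPEC =====
def Spec_parse_title_author (text : String) (out : String × String) : Prop := out = parse_title_author_alt text
instance (text : String) (out : String × String) : Decidable (Spec_parse_title_author text out) := by unfold Spec_parse_title_author; infer_instance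

-- ===== CLAIM (what is proved, stated in full; the proofs are below) =====
def Claim_equal_parse_title_author : Prop := ∀ (text : String), Dom_parse_title_author text → Spec_parse_title_author text (parse_title_author text)

-- ===== LEMMAS AND PROOFS =====

-- find points at the first occurrence: uniqueness direction of PySem.Chars.find_spec
theorem pvFind_eq_of_first (s sub : List Char) (p : Nat)
    (h1 : sub <+: s.drop p) (h2 : ∀ i < p, ¬ sub <+: s.drop i) :
    PySem.Chars.find s sub = (p : Int) := by
  have hnn : 0 ≤ PySem.Chars.find s sub := by
    rw [PySem.Chars.find_nonneg_iff, ← PySem.Chars.isIn_iff_infix,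
      ← PySem.Chars.exists_prefix_drop_iff_isIn]
    exact ⟨p, h1⟩
  obtain ⟨hpre, hmin⟩ := PySem.Chars.find_spec hnn
  have h3 : ¬ (PySem.Chars.find s sub).toNat < p := fun hlt => h2 _ hlt hpre
  have h4 : ¬ p < (PySem.Chars.find s sub).toNat := fun hlt => hmin _ hlt h1
  omega

theorem pvFind_cases (s sub : List Char) (p : Nat)
    (h : ∀ j < p, ¬ sub <+: s.drop j) :
    PySem.Chars.find s sub = -1 ∨ (p : Int) ≤ PySem.Chars.find s sub := by
  by_cases hnn : 0 ≤ PySem.Chars.find s sub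
  · obtain ⟨hpre, _⟩ := PySem.Chars.find_spec hnn
    right
    by_contra hlt
    exact h _ (by omega) hpre
  · left
    have := PySem.Chars.neg_one_le_find s sub
    omega

theorem pvFind_strict (s sub : List Char) (p : Nat)
    (hmin : ∀ j < p, ¬ sub <+: s.drop j) (hp : ¬ sub <+: s.drop p) :
    PySem.Chars.find s sub = -1 ∨ (p : Int) < PySem.Chars.find s sub := by
  have := pvFind_cases s sub (p + 1) (by
    intro j hj
    rcases Nat.lt_succ_iff_lt_or_eq.mp hj with h | h
    · exact hmin j h
    · subst h; exact hp)
  rcases this with h | h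
  · exact Or.inl h
  · right; push_cast at h; omega

theorem pvLt_length_of_prefix_drop (s sub : List Char) (p : Nat)
    (h : sub <+: s.drop p) (hne : sub ≠ []) : p < s.length := by
  have hlen := h.length_le
  rw [List.length_drop] at hlen
  have : sub.length ≠ 0 := fun h0 => hne (List.eq_nil_of_length_eq_zero h0)
  omega

theorem pvGo_zero (sep : List Char) (fuel : Nat) (l cur : List Char) (acc : List (List Char)) :
    PySem.Chars.splitOnMax.go sep fuel 0 l cur acc = ((cur.reverse ++ l) :: acc).reverse := by
  cases fuel with
  | zero => rw [PySem.Chars.splitOnMax.go.eq_def]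
  | succ n => rw [PySem.Chars.splitOnMax.go.eq_def]; cases l <;> simp

theorem pvGo_one (sep : List Char) (hsep : sep ≠ []) :
    ∀ (fuel : Nat) (l cur : List Char) (acc : List (List Char)),
      l.length < fuel → 0 ≤ PySem.Chars.find l sep →
      PySem.Chars.splitOnMax.go sep fuel 1 l cur acc =
        acc.reverse ++ [cur.reverse ++ l.take (PySem.Chars.find l sep).toNat,
                        l.drop ((PySem.Chars.find l sep).toNat + sep.length)] := by
  intro fuel
  induction fuel with
  | zero => intro l cur acc hf _; omega
  | succ n ih =>
    intro l cur acc hf hnn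
    cases l with
    | nil =>
      exfalso
      exact hsep (List.infix_nil.mp ((PySem.Chars.find_nonneg_iff [] sep).mp hnn))
    | cons c rest =>
      rw [PySem.Chars.splitOnMax.go.eq_def]
      simp only [if_neg (one_ne_zero)]
      obtain ⟨q, hfq⟩ : ∃ q : Nat, PySem.Chars.find (c :: rest) sep = (q : Int) :=
        ⟨(PySem.Chars.find (c :: rest) sep).toNat, by omega⟩
      obtain ⟨hpre, hmin⟩ := PySem.Chars.find_spec hnn
      rw [hfq] at hpre hmin ⊢
      simp only [Int.toNat_natCast] at hpre hmin ⊢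
      by_cases hp : sep.isPrefixOf (c :: rest)
      · have hq0 : q = 0 := by
          have := pvFind_eq_of_first (c :: rest) sep 0
            (by simpa using List.isPrefixOf_iff_prefix.mp hp) (by omega)
          rw [hfq] at this; exact_mod_cast this
        subst hq0
        rw [if_pos hp, pvGo_zero]
        simp
      · rw [if_neg hp]
        have hq0 : q ≠ 0 := by
          intro h0
          rw [h0] at hpre
          exact hp (List.isPrefixOf_iff_prefix.mpr (by simpa using hpre))
        have hrest : PySem.Chars.find rest sep = ((q - 1 : Nat) : Int) := by
          apply pvFind_eq_of_first
          · have hd : (c :: rest).drop q = rest.drop (q - 1) := by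
              cases q with
              | zero => omega
              | succ m => simp
            rwa [hd] at hpre
          · intro i hi
            have hd : rest.drop i = (c :: rest).drop (i + 1) := by simp
            rw [hd]
            exact hmin (i + 1) (by omega)
        have hru : rest.length < n := by
          have := hf; simp only [List.length_cons] at this; omega
        rw [ih rest (c :: cur) acc hru (by rw [hrest]; positivity)]
        rw [hrest]
        have hq1 : (((q - 1 : Nat) : Int)).toNat = q - 1 := by omega
        rw [hq1]
        have htake : (c :: cur).reverse ++ rest.take (q - 1) = cur.reverse ++ (c :: rest).take q := by
          cases q with
          | zero => omega
          | succ m => simp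
        have hdrop : rest.drop (q - 1 + sep.length) = (c :: rest).drop (q + sep.length) := by
          cases q with
          | zero => omega
          | succ m =>
            have e1 : m + 1 - 1 + sep.length = m + sep.length := by omega
            have e2 : m + 1 + sep.length = (m + sep.length) + 1 := by omega
            rw [e1, e2, List.drop_succ_cons]
        rw [htake, hdrop]

-- text.split(sel, 1) when sel occurs in text: the parts before and after the first occurrence
theorem pvSplit_eval (text sel : String) (p : Nat)
    (hsep : sel.toList ≠ [])
    (hfind : PySem.Chars.find text.toList sel.toList = (p : Int)) :
    PySem.Str.splitMax? text sel 1 =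
      some [String.ofList (text.toList.take p),
            String.ofList (text.toList.drop (p + sel.toList.length))] := by
  rw [PySem.Str.splitMax?, PySem.Chars.splitMax?,
    if_neg (by simpa [List.isEmpty_iff] using hsep), PySem.Chars.splitOnMax,
    if_neg (by omega)]
  have h1 : ((1 : Int)).toNat = 1 := rfl
  rw [h1, pvGo_one sel.toList hsep _ _ _ _ (by omega) (by rw [hfind]; positivity), hfind]
  simp

-- ----- characterization of B's scan -----

theorem pvScan_none_succ (s : List Char) (j : Nat) (h : pvScanB s j = none) :
    pvScanB s (j + 1) = none := by
  by_cases hj : j < s.length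
  · rw [pvScanB, dif_pos hj] at h
    cases hm : pvDelimsB.find? (fun d => PySem.Chars.startswith (s.drop j) d.toList) with
    | some d => rw [hm] at h; simp at h
    | none => rwa [hm] at h
  · rw [pvScanB, dif_neg (by omega)]

theorem pvScan_none_at (s : List Char) (i j : Nat) (hij : i ≤ j)
    (h : pvScanB s i = none) : pvScanB s j = none := by
  induction j, hij using Nat.le_induction with
  | base => exact h
  | succ k _ ih => exact pvScan_none_succ s k ih

theorem pvScan_none_nomatch (s : List Char) (i j : Nat) (hij : i ≤ j)
    (h : pvScanB s i = none) (d : String) (hd : d ∈ pvDelimsB) :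
    ¬ d.toList <+: s.drop j := by
  intro hpre
  have hdne : d.toList ≠ [] := by
    fin_cases hd <;> simp
  have hjlt : j < s.length := pvLt_length_of_prefix_drop s d.toList j hpre hdne
  have hj := pvScan_none_at s i j hij h
  rw [pvScanB, dif_pos hjlt] at hj
  cases hm : pvDelimsB.find? (fun d => PySem.Chars.startswith (s.drop j) d.toList) with
  | some e => rw [hm] at hj; simp at hj
  | none =>
    have hne := List.find?_eq_none.mp hm d hd
    simp only [Bool.not_eq_true] at hne
    rw [← PySem.Chars.startswith_iff] at hpre
    simp [hne] at hpre

theorem pvScan_some_spec (s : List Char) :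
    ∀ (fuel i p : Nat) (d : String), s.length - i ≤ fuel →
      pvScanB s i = some (p, d) →
      i ≤ p ∧ p < s.length ∧
      (∀ j, i ≤ j → j < p →
        pvDelimsB.find? (fun e => PySem.Chars.startswith (s.drop j) e.toList) = none) ∧
      pvDelimsB.find? (fun e => PySem.Chars.startswith (s.drop p) e.toList) = some d := by
  intro fuel
  induction fuel with
  | zero =>
    intro i p d hf h
    rw [pvScanB, dif_neg (by omega)] at h
    simp at h
  | succ n ih =>
    intro i p d hf h
    by_cases hi : i < s.length
    · rw [pvScanB, dif_pos hi] at h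
      cases hm : pvDelimsB.find? (fun e => PySem.Chars.startswith (s.drop i) e.toList) with
      | some e =>
        rw [hm] at h
        simp only [Option.some.injEq, Prod.mk.injEq] at h
        obtain ⟨hp, hd⟩ := h
        subst hp; subst hd
        exact ⟨le_refl _, hi, by omega, hm⟩
      | none =>
        rw [hm] at h
        obtain ⟨h1, h2, h3, h4⟩ := ih (i + 1) p d (by omega) h
        refine ⟨by omega, h2, ?_, h4⟩
        intro j hj1 hj2
        rcases Nat.eq_or_lt_of_le hj1 with he | hlt
        · rwa [← he]
        · exact h3 j hlt hj2
    · rw [pvScanB, dif_neg hi] at h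
      simp at h

-- A's fold keeps its state when every remaining find is -1 or not smaller
theorem pvFold_keep (text : String) :
    ∀ (ds : List String) (q : Int) (sel : Option String),
      (∀ e ∈ ds, PySem.Str.find text e = -1 ∨ q ≤ PySem.Str.find text e) →
      List.foldl (pvStepA text) (q, sel) ds = (q, sel) := by
  intro ds
  induction ds with
  | nil => intro q sel _; rfl
  | cons e rest ih =>
    intro q sel h
    rw [List.foldl_cons]
    have he := h e (by simp)
    have hstep : pvStepA text (q, sel) e = (q, sel) := by
      simp only [pvStepA]
      rw [if_neg (by rcases he with he | he <;> omega)]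
    rw [hstep]
    exact ih q sel (fun e' he' => h e' (by simp [he']))

-- A's fold result when d is the first delimiter whose find equals p and
-- no delimiter's find is below p
theorem pvFold_sel (text : String) (p : Nat) (d : String) :
    ∀ (pre post : List String) (q : Int) (sel : Option String),
      (p : Int) < q →
      (∀ e ∈ pre, PySem.Str.find text e = -1 ∨ (p : Int) < PySem.Str.find text e) →
      PySem.Str.find text d = (p : Int) →
      (∀ e ∈ post, PySem.Str.find text e = -1 ∨ (p : Int) ≤ PySem.Str.find text e) →
      List.foldl (pvStepA text) (q, sel) (pre ++ d :: post) = ((p : Int), some d) := by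
  intro pre
  induction pre with
  | nil =>
    intro post q sel hq _ hd hpost
    rw [List.nil_append, List.foldl_cons]
    have hstep : pvStepA text (q, sel) d = ((p : Int), some d) := by
      simp only [pvStepA]
      rw [if_pos (by constructor <;> omega), hd]
    rw [hstep]
    exact pvFold_keep text post _ _ hpost
  | cons e pre' ih =>
    intro post q sel hq hpre hd hpost
    rw [List.cons_append, List.foldl_cons]
    have he := hpre e (by simp)
    simp only [pvStepA]
    by_cases hcond : PySem.Str.find text e ≠ -1 ∧ PySem.Str.find text e < q
    · rw [if_pos hcond]
      exact ih post _ _ (by rcases he with he | he <;> omega)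
        (fun e' he' => hpre e' (by simp [he'])) hd hpost
    · rw [if_neg hcond]
      exact ih post _ _ hq (fun e' he' => hpre e' (by simp [he'])) hd hpost

-- A's output when its fold selected delimiter d at position p
theorem pvSome_case (text : String) (p : Nat) (d : String)
    (hd : d ∈ pvDelimsB)
    (hfd : PySem.Chars.find text.toList d.toList = (p : Int))
    (hfold : List.foldl (pvStepA text) (PySem.Str.len text, none) ["--", "-", "/", "\\", "|"] =
      ((p : Int), some d)) :
    parse_title_author text =
      (PySem.Str.strip (PySem.Str.slice text none (some (p : Int))),
       PySem.Str.strip (PySem.Str.slice text (some ((p : Int) + PySem.Str.len d)) none)) := by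
  have hsep : d.toList ≠ [] := by fin_cases hd <;> simp
  rw [parse_title_author]
  simp only [hfold]
  rw [pvSplit_eval text d p hsep hfd]
  have hlen : PySem.Str.len d = (d.toList.length : Int) := by
    fin_cases hd <;> rfl
  have ht : ((p : Int)).toNat = p := by omega
  have ht2 : ((p : Int) + (d.toList.length : Int)).toNat = p + d.toList.length := by omega
  simp only [Option.getD_some]
  rw [PySem.Str.slice, PySem.Str.slice,
    PySem.Chars.slice_eq_listSlice, PySem.Chars.slice_eq_listSlice,
    PySem.List.slice_to text.toList (by omega), PySem.List.slice_from text.toList (by omega),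
    hlen, ht, ht2]
  simp [PySem.List.pyGet?, PySem.List.pyIdx?, PySem.Str.strip]

-- ----- main equivalence -----

theorem pvMain (text : String) : parse_title_author text = parse_title_author_alt text := by
  cases hscan : pvScanB text.toList 0 with
  | none =>
    -- no delimiter occurs anywhere: every find is -1 and A's fold keeps (len, none)
    have hnom : ∀ d ∈ pvDelimsB, PySem.Chars.find text.toList d.toList = -1 := by
      intro d hd
      rw [PySem.Chars.find_eq_neg_one_iff, ← PySem.Chars.isIn_iff_infix,
        ← PySem.Chars.exists_prefix_drop_iff_isIn]
      rintro ⟨j, hj⟩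
      exact pvScan_none_nomatch text.toList 0 j (by omega) hscan d hd hj
    have h1 : PySem.Str.find text "--" = -1 := hnom "--" (by simp [pvDelimsB])
    have h2 : PySem.Str.find text "-" = -1 := hnom "-" (by simp [pvDelimsB])
    have h3 : PySem.Str.find text "/" = -1 := hnom "/" (by simp [pvDelimsB])
    have h4 : PySem.Str.find text "\\" = -1 := hnom "\\" (by simp [pvDelimsB])
    have h5 : PySem.Str.find text "|" = -1 := hnom "|" (by simp [pvDelimsB])
    rw [parse_title_author, parse_title_author_alt, hscan]
    rw [pvFold_keep text ["--", "-", "/", "\\", "|"] (PySem.Str.len text) none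
      (by intro e he; fin_cases he; exacts [Or.inl h1, Or.inl h2, Or.inl h3, Or.inl h4, Or.inl h5])]
  | some pd =>
    obtain ⟨p, d⟩ := pd
    obtain ⟨-, hplt, hmin, hat⟩ :=
      pvScan_some_spec text.toList (text.toList.length) 0 p d (by omega) hscan
    have hnomatch : ∀ e ∈ pvDelimsB, ∀ j < p, ¬ e.toList <+: text.toList.drop j := by
      intro e he j hj hpre
      have hne := List.find?_eq_none.mp (hmin j (by omega) hj) e he
      simp only [Bool.not_eq_true] at hne
      rw [← PySem.Chars.startswith_iff] at hpre
      simp [hne] at hpre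
    -- every delimiter's find is -1 or ≥ p
    have hc : ∀ e ∈ pvDelimsB, PySem.Chars.find text.toList e.toList = -1 ∨
        (p : Int) ≤ PySem.Chars.find text.toList e.toList :=
      fun e he => pvFind_cases _ _ p (hnomatch e he)
    -- the selected delimiter's find is exactly p, earlier ones are -1 or > p
    have hsel : ∀ e ∈ pvDelimsB, e.toList <+: text.toList.drop p →
        PySem.Chars.find text.toList e.toList = (p : Int) :=
      fun e he hm => pvFind_eq_of_first _ _ p hm (hnomatch e he)
    have hstrict : ∀ e ∈ pvDelimsB, ¬ e.toList <+: text.toList.drop p →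
        PySem.Chars.find text.toList e.toList = -1 ∨
          (p : Int) < PySem.Chars.find text.toList e.toList :=
      fun e he hm => pvFind_strict _ _ p (hnomatch e he) hm
    have hL : (p : Int) < PySem.Str.len text := by
      have : PySem.Str.len text = (text.toList.length : Int) := rfl
      omega
    rw [parse_title_author_alt, hscan]
    -- case on which delimiter matches first (in list order) at position p
    cases hb1 : PySem.Chars.startswith (text.toList.drop p) "--".toList with
    | true =>
      have hdv : d = "--" := by
        simp only [pvDelimsB, List.find?, hb1] at hat
        exact (Option.some_injective _ hat).symm
      subst hdv
      have hf1 : PySem.Str.find text "--" = (p : Int) := hsel "--" (by simp [pvDelimsB])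
        ((PySem.Chars.startswith_iff _ _).mp hb1)
      have hf2 : PySem.Str.find text "-" = -1 ∨ (p : Int) ≤ PySem.Str.find text "-" := hc "-" (by simp [pvDelimsB])
      have hf3 : PySem.Str.find text "/" = -1 ∨ (p : Int) ≤ PySem.Str.find text "/" := hc "/" (by simp [pvDelimsB])
      have hf4 : PySem.Str.find text "\\" = -1 ∨ (p : Int) ≤ PySem.Str.find text "\\" := hc "\\" (by simp [pvDelimsB])
      have hf5 : PySem.Str.find text "|" = -1 ∨ (p : Int) ≤ PySem.Str.find text "|" := hc "|" (by simp [pvDelimsB])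
      apply pvSome_case text p "--" (by simp [pvDelimsB]) hf1
      exact pvFold_sel text p _ [] ["-", "/", "\\", "|"] _ none hL
        (by intro e he; simp at he) hf1 (by intro e he; fin_cases he; exacts [hf2, hf3, hf4, hf5])
    | false =>
    have hs1 : ¬ "--".toList <+: text.toList.drop p := by
      rw [← PySem.Chars.startswith_iff, hb1]; simp
    cases hb2 : PySem.Chars.startswith (text.toList.drop p) "-".toList with
    | true =>
      have hdv : d = "-" := by
        simp only [pvDelimsB, List.find?, hb1, hb2] at hat
        exact (Option.some_injective _ hat).symm
      subst hdv
      have hf1 : PySem.Str.find text "--" = -1 ∨ (p : Int) < PySem.Str.find text "--" := hstrict "--" (by simp [pvDelimsB]) hs1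
      have hf2 : PySem.Str.find text "-" = (p : Int) := hsel "-" (by simp [pvDelimsB]) ((PySem.Chars.startswith_iff _ _).mp hb2)
      have hf3 : PySem.Str.find text "/" = -1 ∨ (p : Int) ≤ PySem.Str.find text "/" := hc "/" (by simp [pvDelimsB])
      have hf4 : PySem.Str.find text "\\" = -1 ∨ (p : Int) ≤ PySem.Str.find text "\\" := hc "\\" (by simp [pvDelimsB])
      have hf5 : PySem.Str.find text "|" = -1 ∨ (p : Int) ≤ PySem.Str.find text "|" := hc "|" (by simp [pvDelimsB])
      apply pvSome_case text p "-" (by simp [pvDelimsB]) hf2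
      exact pvFold_sel text p _ ["--"] ["/", "\\", "|"] _ none hL
        (by intro e he; fin_cases he; exacts [hf1]) hf2 (by intro e he; fin_cases he; exacts [hf3, hf4, hf5])
    | false =>
    have hs2 : ¬ "-".toList <+: text.toList.drop p := by
      rw [← PySem.Chars.startswith_iff, hb2]; simp
    cases hb3 : PySem.Chars.startswith (text.toList.drop p) "/".toList with
    | true =>
      have hdv : d = "/" := by
        simp only [pvDelimsB, List.find?, hb1, hb2, hb3] at hat
        exact (Option.some_injective _ hat).symm
      subst hdv
      have hf1 : PySem.Str.find text "--" = -1 ∨ (p : Int) < PySem.Str.find text "--" := hstrict "--" (by simp [pvDelimsB]) hs1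
      have hf2 : PySem.Str.find text "-" = -1 ∨ (p : Int) < PySem.Str.find text "-" := hstrict "-" (by simp [pvDelimsB]) hs2
      have hf3 : PySem.Str.find text "/" = (p : Int) := hsel "/" (by simp [pvDelimsB]) ((PySem.Chars.startswith_iff _ _).mp hb3)
      have hf4 : PySem.Str.find text "\\" = -1 ∨ (p : Int) ≤ PySem.Str.find text "\\" := hc "\\" (by simp [pvDelimsB])
      have hf5 : PySem.Str.find text "|" = -1 ∨ (p : Int) ≤ PySem.Str.find text "|" := hc "|" (by simp [pvDelimsB])
      apply pvSome_case text p "/" (by simp [pvDelimsB]) hf3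
      exact pvFold_sel text p _ ["--", "-"] ["\\", "|"] _ none hL
        (by intro e he; fin_cases he; exacts [hf1, hf2]) hf3 (by intro e he; fin_cases he; exacts [hf4, hf5])
    | false =>
    have hs3 : ¬ "/".toList <+: text.toList.drop p := by
      rw [← PySem.Chars.startswith_iff, hb3]; simp
    cases hb4 : PySem.Chars.startswith (text.toList.drop p) "\\".toList with
    | true =>
      have hdv : d = "\\" := by
        simp only [pvDelimsB, List.find?, hb1, hb2, hb3, hb4] at hat
        exact (Option.some_injective _ hat).symm
      subst hdv
      have hf1 : PySem.Str.find text "--" = -1 ∨ (p : Int) < PySem.Str.find text "--" := hstrict "--" (by simp [pvDelimsB]) hs1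
      have hf2 : PySem.Str.find text "-" = -1 ∨ (p : Int) < PySem.Str.find text "-" := hstrict "-" (by simp [pvDelimsB]) hs2
      have hf3 : PySem.Str.find text "/" = -1 ∨ (p : Int) < PySem.Str.find text "/" := hstrict "/" (by simp [pvDelimsB]) hs3
      have hf4 : PySem.Str.find text "\\" = (p : Int) := hsel "\\" (by simp [pvDelimsB]) ((PySem.Chars.startswith_iff _ _).mp hb4)
      have hf5 : PySem.Str.find text "|" = -1 ∨ (p : Int) ≤ PySem.Str.find text "|" := hc "|" (by simp [pvDelimsB])
      apply pvSome_case text p "\\" (by simp [pvDelimsB]) hf4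
      exact pvFold_sel text p _ ["--", "-", "/"] ["|"] _ none hL
        (by intro e he; fin_cases he; exacts [hf1, hf2, hf3]) hf4 (by intro e he; fin_cases he; exacts [hf5])
    | false =>
    have hs4 : ¬ "\\".toList <+: text.toList.drop p := by
      rw [← PySem.Chars.startswith_iff, hb4]; simp
    cases hb5 : PySem.Chars.startswith (text.toList.drop p) "|".toList with
    | true =>
      have hdv : d = "|" := by
        simp only [pvDelimsB, List.find?, hb1, hb2, hb3, hb4, hb5] at hat
        exact (Option.some_injective _ hat).symm
      subst hdv
      have hf1 : PySem.Str.find text "--" = -1 ∨ (p : Int) < PySem.Str.find text "--" := hstrict "--" (by simp [pvDelimsB]) hs1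
      have hf2 : PySem.Str.find text "-" = -1 ∨ (p : Int) < PySem.Str.find text "-" := hstrict "-" (by simp [pvDelimsB]) hs2
      have hf3 : PySem.Str.find text "/" = -1 ∨ (p : Int) < PySem.Str.find text "/" := hstrict "/" (by simp [pvDelimsB]) hs3
      have hf4 : PySem.Str.find text "\\" = -1 ∨ (p : Int) < PySem.Str.find text "\\" := hstrict "\\" (by simp [pvDelimsB]) hs4
      have hf5 : PySem.Str.find text "|" = (p : Int) := hsel "|" (by simp [pvDelimsB]) ((PySem.Chars.startswith_iff _ _).mp hb5)
      apply pvSome_case text p "|" (by simp [pvDelimsB]) hf5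
      exact pvFold_sel text p _ ["--", "-", "/", "\\"] [] _ none hL
        (by intro e he; fin_cases he; exacts [hf1, hf2, hf3, hf4]) hf5 (by intro e he; simp at he)
    | false =>
      exfalso
      simp only [pvDelimsB, List.find?, hb1, hb2, hb3, hb4, hb5] at hat
      simp at hat

-- ===== VERDICT (by name: the statement is the Claim_ definition above) =====
theorem parse_title_author_spec : Claim_equal_parse_title_author := by
  intro text _
  unfold Spec_parse_title_author
  exact pvMain text
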